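-- pv_equiv track=rewrite | github.com/linuxdojo/evon-hub | mapper/deployment_mapper.py | get_inventory_changes
-- ===== SOURCE A (Python) =====
-- def get_inventory_changes(previous_inventory, new_inventory):
--     """
--     diff old and new inventories returning a dictionary of changed state
--     """
--     changes = {
--         'new': {},
--         'removed': {},
--         'updated': {},
--         'unchanged': {}
--         }
--     for host in new_inventory:
--         if host not in previous_inventory:
--             changes['new'][host] = new_inventory[host]
--         elif previous_inventory[host] != new_inventory[host]:
--             changes['updated'][host] = new_inventory[host]
--         else:
--             changes['unchanged'][host] = new_inventory[host]
--     for host in previous_inventory: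
--         if host not in new_inventory:
--             changes['removed'][host] = previous_inventory[host]
--     return changes
-- ===== SOURCE B (Python) =====
-- _MISSING = object()
--
-- def get_inventory_changes(previous_inventory, new_inventory):
--     """
--     diff old and new inventories returning a dictionary of changed state
--
--     Single pass: consume a working copy of previous_inventory with pop();
--     whatever is left over at the end is exactly the 'removed' bucket,
--     so no second loop or membership test against new_inventory is needed.
--     """
--     remaining = dict(previous_inventory)
--     new_hosts = {}
--     updated = {}
--     unchanged = {}
--     for host, facts in new_inventory.items():
--         old = remaining.pop(host, _MISSING)
--         if old is _MISSING:
--             new_hosts[host] = facts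
--         elif old != facts:
--             updated[host] = facts
--         else:
--             unchanged[host] = facts
--     return {
--         'new': new_hosts,
--         'removed': remaining,
--         'updated': updated,
--         'unchanged': unchanged,
--         }
-- ===== Notes on version B (the rewrite author's own statement) =====
-- stated objective: alternative
-- what changed: A's two staged loops (classify every new host by membership in previous_inventory, then rescan previous_inventory for hosts absent from new_inventory) are replaced by one consuming pass: a working copy of previous_inventory is destructively pop()ed while classifying new hosts, and the residual dict IS the 'removed' bucket, so the second loop and the membership test against new_inventory disappear.
import Mathlib
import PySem

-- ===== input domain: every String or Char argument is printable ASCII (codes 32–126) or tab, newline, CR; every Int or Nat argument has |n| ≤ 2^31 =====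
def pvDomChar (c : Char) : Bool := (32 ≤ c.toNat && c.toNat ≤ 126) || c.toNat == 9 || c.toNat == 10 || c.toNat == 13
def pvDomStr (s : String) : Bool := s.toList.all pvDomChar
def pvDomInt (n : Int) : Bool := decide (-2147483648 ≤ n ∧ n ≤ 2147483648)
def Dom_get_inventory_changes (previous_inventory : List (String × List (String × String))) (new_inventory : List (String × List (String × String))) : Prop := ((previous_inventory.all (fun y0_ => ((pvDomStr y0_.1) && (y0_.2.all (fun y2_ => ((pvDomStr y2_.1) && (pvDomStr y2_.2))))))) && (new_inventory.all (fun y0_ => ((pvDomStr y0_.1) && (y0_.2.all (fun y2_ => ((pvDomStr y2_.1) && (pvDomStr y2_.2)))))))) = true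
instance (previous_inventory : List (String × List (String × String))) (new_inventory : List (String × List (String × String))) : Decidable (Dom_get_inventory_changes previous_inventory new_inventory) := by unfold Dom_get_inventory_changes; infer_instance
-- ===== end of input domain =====

-- B replaces A's two staged loops by one consuming pass: it pop()s each new host out of a working
-- copy of previous_inventory and the residual dict IS the 'removed' bucket (objective: alternative).
-- Equivalence is about return values (neither program mutates its arguments).

-- Python's '==' on the per-host fact dicts ignores insertion order: dict equality
-- (same key set, same value at every key, via first-match lookup). Shared by both ports.
def pvDictEq (a b : List (String × String)) : Bool :=
  a.all (fun p => (PySem.Dict.mk b).get? p.1 == some p.2) &&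
  b.all (fun p => (PySem.Dict.mk a).get? p.1 == some p.2)

-- ===== PORT A =====
-- body of A's first loop: branch on membership in previous_inventory, write the host into one bucket
def pvStepA (previous_inventory new_inventory : List (String × List (String × String)))
    (ch : PySem.Dict String (List (String × List (String × String)))) (host : String) :
    PySem.Dict String (List (String × List (String × String))) :=
  if (PySem.Dict.mk previous_inventory).get? host = none then
    ch.insert "new" (((PySem.Dict.mk (ch.getD "new" [])).insert host ((PySem.Dict.mk new_inventory).getD host [])).items)
  else if pvDictEq ((PySem.Dict.mk previous_inventory).getD host []) ((PySem.Dict.mk new_inventory).getD host []) = false then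
    ch.insert "updated" (((PySem.Dict.mk (ch.getD "updated" [])).insert host ((PySem.Dict.mk new_inventory).getD host [])).items)
  else
    ch.insert "unchanged" (((PySem.Dict.mk (ch.getD "unchanged" [])).insert host ((PySem.Dict.mk new_inventory).getD host [])).items)

-- body of A's second loop: hosts gone from new_inventory go to 'removed'
def pvStepA2 (previous_inventory new_inventory : List (String × List (String × String)))
    (ch : PySem.Dict String (List (String × List (String × String)))) (host : String) :
    PySem.Dict String (List (String × List (String × String))) :=
  if (PySem.Dict.mk new_inventory).get? host = none then
    ch.insert "removed" (((PySem.Dict.mk (ch.getD "removed" [])).insert host ((PySem.Dict.mk previous_inventory).getD host [])).items)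
  else ch

def get_inventory_changes (previous_inventory : List (String × List (String × String))) (new_inventory : List (String × List (String × String))) : List (String × List (String × List (String × String))) :=
  ((previous_inventory.map Prod.fst).foldl (pvStepA2 previous_inventory new_inventory)
    ((new_inventory.map Prod.fst).foldl (pvStepA previous_inventory new_inventory)
      (PySem.Dict.mk [("new", []), ("removed", []), ("updated", []), ("unchanged", [])]))).items

-- ===== PORT B =====
-- state: (remaining working copy of previous_inventory, new bucket, updated bucket, unchanged bucket)
def pvStateB : Type := PySem.Dict String (List (String × String)) ×
  PySem.Dict String (List (String × String)) ×
  PySem.Dict String (List (String × String)) ×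
  PySem.Dict String (List (String × String))

-- loop body of B: old = remaining.pop(host, MISSING); classify by the popped value
def pvStepB (st : pvStateB) (p : String × List (String × String)) : pvStateB :=
  match st with
  | (rem, nb, ub, cb) =>
    match rem.pop? p.1 with
    | none => (rem, nb.insert p.1 p.2, ub, cb)
    | some (old, rem') =>
      if pvDictEq old p.2 = false then (rem', nb, ub.insert p.1 p.2, cb)
      else (rem', nb, ub, cb.insert p.1 p.2)

def get_inventory_changes_alt (previous_inventory : List (String × List (String × String))) (new_inventory : List (String × List (String × String))) : List (String × List (String × List (String × String))) :=
  match new_inventory.foldl pvStepB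
      (PySem.Dict.mk previous_inventory, PySem.Dict.empty, PySem.Dict.empty, PySem.Dict.empty) with
  | (remaining, new_hosts, updated, unchanged) =>
    [("new", new_hosts.items), ("removed", remaining.items),
     ("updated", updated.items), ("unchanged", unchanged.items)]

-- ===== PRECONDITION & SPEC =====
-- Pre_ excludes association lists with duplicate host keys: those do not represent a Python dict
-- (A's arguments are dicts, whose keys are unique), so neither program's value there is specified.
def Pre_get_inventory_changes (previous_inventory : List (String × List (String × String))) (new_inventory : List (String × List (String × String))) : Prop :=
  (previous_inventory.map Prod.fst).Nodup ∧ (new_inventory.map Prod.fst).Nodup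
instance (previous_inventory : List (String × List (String × String))) (new_inventory : List (String × List (String × String))) : Decidable (Pre_get_inventory_changes previous_inventory new_inventory) := by unfold Pre_get_inventory_changes; infer_instance

def pvWitness_get_inventory_changes : (List (String × List (String × String))) × (List (String × List (String × String))) :=
  ([("a", [("os", "linux")]), ("b", [("os", "bsd")])], [("b", [("os", "mac")]), ("c", [])])

def Spec_get_inventory_changes (previous_inventory : List (String × List (String × String))) (new_inventory : List (String × List (String × String))) (out : List (String × List (String × List (String × String)))) : Prop := out = get_inventory_changes_alt previous_inventory new_inventory
instance (previous_inventory : List (String × List (String × String))) (new_inventory : List (String × List (String × String))) (out : List (String × List (String × List (String × String)))) : Decidable (Spec_get_inventory_changes previous_inventory new_inventory out) := by unfold Spec_get_inventory_changes; infer_instance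

-- ===== CLAIM (what is proved, stated in full; the proofs are below) =====
def Claim_equal_get_inventory_changes : Prop := ∀ (previous_inventory : List (String × List (String × String))) (new_inventory : List (String × List (String × String))), Dom_get_inventory_changes previous_inventory new_inventory → Pre_get_inventory_changes previous_inventory new_inventory → Spec_get_inventory_changes previous_inventory new_inventory (get_inventory_changes previous_inventory new_inventory)

-- ===== LEMMAS AND PROOFS =====

lemma pv_contains_false {ν : Type} (l : List (String × ν)) (k : String)
    (h : k ∉ l.map Prod.fst) : (PySem.Dict.mk l).contains k = false := by
  simp only [PySem.Dict.contains_mk, List.any_eq_false]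
  intro p hp
  simp only [beq_iff_eq]
  intro hk
  exact h (List.mem_map.mpr ⟨p, hp, hk⟩)

lemma pv_insert_bucket1 (n r u c x : List (String × List (String × String))) :
    (PySem.Dict.mk [("new", n), ("removed", r), ("updated", u), ("unchanged", c)]).insert "new" x
    = PySem.Dict.mk [("new", x), ("removed", r), ("updated", u), ("unchanged", c)] := by
  simp [PySem.Dict.insert]

lemma pv_insert_bucket2 (n r u c x : List (String × List (String × String))) :
    (PySem.Dict.mk [("new", n), ("removed", r), ("updated", u), ("unchanged", c)]).insert "removed" x
    = PySem.Dict.mk [("new", n), ("removed", x), ("updated", u), ("unchanged", c)] := by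
  simp [PySem.Dict.insert]

lemma pv_insert_bucket3 (n r u c x : List (String × List (String × String))) :
    (PySem.Dict.mk [("new", n), ("removed", r), ("updated", u), ("unchanged", c)]).insert "updated" x
    = PySem.Dict.mk [("new", n), ("removed", r), ("updated", x), ("unchanged", c)] := by
  simp [PySem.Dict.insert]

lemma pv_insert_bucket4 (n r u c x : List (String × List (String × String))) :
    (PySem.Dict.mk [("new", n), ("removed", r), ("updated", u), ("unchanged", c)]).insert "unchanged" x
    = PySem.Dict.mk [("new", n), ("removed", r), ("updated", u), ("unchanged", x)] := by
  simp [PySem.Dict.insert]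

lemma pv_getD_bucket1 (n r u c : List (String × List (String × String))) :
    (PySem.Dict.mk [("new", n), ("removed", r), ("updated", u), ("unchanged", c)]).getD "new" [] = n := by
  simp [PySem.Dict.getD_eq_get?_getD, PySem.Dict.get?_mk_cons]
lemma pv_getD_bucket2 (n r u c : List (String × List (String × String))) :
    (PySem.Dict.mk [("new", n), ("removed", r), ("updated", u), ("unchanged", c)]).getD "removed" [] = r := by
  simp [PySem.Dict.getD_eq_get?_getD, PySem.Dict.get?_mk_cons]
lemma pv_getD_bucket3 (n r u c : List (String × List (String × String))) :
    (PySem.Dict.mk [("new", n), ("removed", r), ("updated", u), ("unchanged", c)]).getD "updated" [] = u := by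
  simp [PySem.Dict.getD_eq_get?_getD, PySem.Dict.get?_mk_cons]
lemma pv_getD_bucket4 (n r u c : List (String × List (String × String))) :
    (PySem.Dict.mk [("new", n), ("removed", r), ("updated", u), ("unchanged", c)]).getD "unchanged" [] = c := by
  simp [PySem.Dict.getD_eq_get?_getD, PySem.Dict.get?_mk_cons]

lemma pv_loop1 (prev new : List (String × List (String × String))) :
    ∀ (xs : List (String × List (String × String))) (n r u c : List (String × List (String × String))),
    (∀ p ∈ xs, (PySem.Dict.mk new).get? p.1 = some p.2) →
    (xs.map Prod.fst).Nodup →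
    (∀ p ∈ xs, p.1 ∉ n.map Prod.fst) →
    (∀ p ∈ xs, p.1 ∉ u.map Prod.fst) →
    (∀ p ∈ xs, p.1 ∉ c.map Prod.fst) →
    (xs.map Prod.fst).foldl (pvStepA prev new)
      (PySem.Dict.mk [("new", n), ("removed", r), ("updated", u), ("unchanged", c)])
    = PySem.Dict.mk
        [("new", n ++ xs.filter (fun p => !(PySem.Dict.mk prev).contains p.1)),
         ("removed", r),
         ("updated", u ++ xs.filter (fun p => (PySem.Dict.mk prev).contains p.1 && !pvDictEq ((PySem.Dict.mk prev).getD p.1 []) p.2)),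
         ("unchanged", c ++ xs.filter (fun p => (PySem.Dict.mk prev).contains p.1 && pvDictEq ((PySem.Dict.mk prev).getD p.1 []) p.2))] := by
  intro xs
  induction xs with
  | nil => intro n r u c _ _ _ _ _; simp
  | cons p t ih =>
    intro n r u c hget hnd hn hu hc
    have hgD : (PySem.Dict.mk new).getD p.1 [] = p.2 :=
      PySem.Dict.getD_of_get?_eq_some _ _ (hget p (by simp))
    have hcont : ((PySem.Dict.mk prev).contains p.1) = ((PySem.Dict.mk prev).get? p.1).isSome :=
      PySem.Dict.contains_eq_isSome_get? _ _
    have hnd' : (t.map Prod.fst).Nodup := (List.nodup_cons.mp hnd).2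
    have hpt : p.1 ∉ t.map Prod.fst := (List.nodup_cons.mp hnd).1
    simp only [List.map_cons, List.foldl_cons]
    by_cases h1 : (PySem.Dict.mk prev).get? p.1 = none
    · have hc1 : (PySem.Dict.mk prev).contains p.1 = false := by rw [hcont, h1]; rfl
      have hstep : pvStepA prev new (PySem.Dict.mk [("new", n), ("removed", r), ("updated", u), ("unchanged", c)]) p.1
           = PySem.Dict.mk [("new", n ++ [p]), ("removed", r), ("updated", u), ("unchanged", c)] := by
        rw [pvStepA, if_pos h1, pv_getD_bucket1,
          PySem.Dict.items_insert_of_not_contains _ _ (pv_contains_false n p.1 (hn p (by simp))),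
          hgD, pv_insert_bucket1]
      rw [hstep, ih (n ++ [p]) r u c (fun q hq => hget q (by simp [hq])) hnd'
            (fun q hq => by
              simp only [List.map_append, List.mem_append]
              rintro (h | h)
              · exact hn q (by simp [hq]) h
              · simp at h; exact hpt (h ▸ List.mem_map.mpr ⟨q, hq, rfl⟩))
            (fun q hq => hu q (by simp [hq])) (fun q hq => hc q (by simp [hq]))]
      rw [List.filter_cons, List.filter_cons, List.filter_cons]
      simp [hc1]
    · rw [← ne_eq, Option.ne_none_iff_exists'] at h1
      obtain ⟨w, hw⟩ := h1
      have hc1 : (PySem.Dict.mk prev).contains p.1 = true := by rw [hcont, hw]; rfl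
      by_cases h2 : pvDictEq ((PySem.Dict.mk prev).getD p.1 []) p.2 = false
      · have hstep : pvStepA prev new (PySem.Dict.mk [("new", n), ("removed", r), ("updated", u), ("unchanged", c)]) p.1
             = PySem.Dict.mk [("new", n), ("removed", r), ("updated", u ++ [p]), ("unchanged", c)] := by
          rw [pvStepA, if_neg (by simp [hw]), hgD, if_pos h2, pv_getD_bucket3,
            PySem.Dict.items_insert_of_not_contains _ _ (pv_contains_false u p.1 (hu p (by simp))),
            pv_insert_bucket3]
        rw [hstep, ih n r (u ++ [p]) c (fun q hq => hget q (by simp [hq])) hnd'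
              (fun q hq => hn q (by simp [hq]))
              (fun q hq => by
                simp only [List.map_append, List.mem_append]
                rintro (h | h)
                · exact hu q (by simp [hq]) h
                · simp at h; exact hpt (h ▸ List.mem_map.mpr ⟨q, hq, rfl⟩))
              (fun q hq => hc q (by simp [hq]))]
        rw [List.filter_cons, List.filter_cons, List.filter_cons]
        simp [hc1, h2]
      · rw [Bool.not_eq_false] at h2
        have hstep : pvStepA prev new (PySem.Dict.mk [("new", n), ("removed", r), ("updated", u), ("unchanged", c)]) p.1
             = PySem.Dict.mk [("new", n), ("removed", r), ("updated", u), ("unchanged", c ++ [p])] := by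
          rw [pvStepA, if_neg (by simp [hw]), hgD, if_neg (by simp [h2]), pv_getD_bucket4,
            PySem.Dict.items_insert_of_not_contains _ _ (pv_contains_false c p.1 (hc p (by simp))),
            pv_insert_bucket4]
        rw [hstep, ih n r u (c ++ [p]) (fun q hq => hget q (by simp [hq])) hnd'
              (fun q hq => hn q (by simp [hq]))
              (fun q hq => hu q (by simp [hq]))
              (fun q hq => by
                simp only [List.map_append, List.mem_append]
                rintro (h | h)
                · exact hc q (by simp [hq]) h
                · simp at h; exact hpt (h ▸ List.mem_map.mpr ⟨q, hq, rfl⟩))]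
        rw [List.filter_cons, List.filter_cons, List.filter_cons]
        simp [hc1, h2]

lemma pv_loop2 (prev new : List (String × List (String × String))) :
    ∀ (xs : List (String × List (String × String))) (n r u c : List (String × List (String × String))),
    (∀ p ∈ xs, (PySem.Dict.mk prev).get? p.1 = some p.2) →
    (xs.map Prod.fst).Nodup →
    (∀ p ∈ xs, p.1 ∉ r.map Prod.fst) →
    (xs.map Prod.fst).foldl (pvStepA2 prev new)
      (PySem.Dict.mk [("new", n), ("removed", r), ("updated", u), ("unchanged", c)])
    = PySem.Dict.mk
        [("new", n),
         ("removed", r ++ xs.filter (fun p => !(PySem.Dict.mk new).contains p.1)),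
         ("updated", u),
         ("unchanged", c)] := by
  intro xs
  induction xs with
  | nil => intro n r u c _ _ _; simp
  | cons p t ih =>
    intro n r u c hget hnd hr
    have hgD : (PySem.Dict.mk prev).getD p.1 [] = p.2 :=
      PySem.Dict.getD_of_get?_eq_some _ _ (hget p (by simp))
    have hcont : ((PySem.Dict.mk new).contains p.1) = ((PySem.Dict.mk new).get? p.1).isSome :=
      PySem.Dict.contains_eq_isSome_get? _ _
    have hnd' : (t.map Prod.fst).Nodup := (List.nodup_cons.mp hnd).2
    have hpt : p.1 ∉ t.map Prod.fst := (List.nodup_cons.mp hnd).1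
    simp only [List.map_cons, List.foldl_cons]
    by_cases h1 : (PySem.Dict.mk new).get? p.1 = none
    · have hc1 : (PySem.Dict.mk new).contains p.1 = false := by rw [hcont, h1]; rfl
      have hstep : pvStepA2 prev new (PySem.Dict.mk [("new", n), ("removed", r), ("updated", u), ("unchanged", c)]) p.1
           = PySem.Dict.mk [("new", n), ("removed", r ++ [p]), ("updated", u), ("unchanged", c)] := by
        rw [pvStepA2, if_pos h1, pv_getD_bucket2,
          PySem.Dict.items_insert_of_not_contains _ _ (pv_contains_false r p.1 (hr p (by simp))),
          hgD, pv_insert_bucket2]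
      rw [hstep, ih n (r ++ [p]) u c (fun q hq => hget q (by simp [hq])) hnd'
            (fun q hq => by
              simp only [List.map_append, List.mem_append]
              rintro (h | h)
              · exact hr q (by simp [hq]) h
              · simp at h; exact hpt (h ▸ List.mem_map.mpr ⟨q, hq, rfl⟩))]
      rw [List.filter_cons]
      simp [hc1]
    · have hc1 : (PySem.Dict.mk new).contains p.1 = true := by
        rw [hcont]; rcases Option.ne_none_iff_exists'.mp h1 with ⟨w, hw⟩; rw [hw]; rfl
      have hstep : pvStepA2 prev new (PySem.Dict.mk [("new", n), ("removed", r), ("updated", u), ("unchanged", c)]) p.1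
           = PySem.Dict.mk [("new", n), ("removed", r), ("updated", u), ("unchanged", c)] := by
        rw [pvStepA2, if_neg h1]
      rw [hstep, ih n r u c (fun q hq => hget q (by simp [hq])) hnd' (fun q hq => hr q (by simp [hq]))]
      rw [List.filter_cons]
      simp [hc1]

-- ===== B-side lemmas =====

lemma pv_find_filter_ne {ν : Type} (l : List (String × ν)) (k k' : String) (h : k' ≠ k) :
    (l.filter (fun p => !(p.1 == k))).find? (fun p => p.1 == k') = l.find? (fun p => p.1 == k') := by
  induction l with
  | nil => simp
  | cons q t ih =>
    rw [List.filter_cons]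
    by_cases hk : q.1 = k
    · have hq' : (q.1 == k') = false := by
        simp only [beq_eq_false_iff_ne, ne_eq, hk]
        exact fun e => h e.symm
      have hkk' : (k == k') = false := by
        simp only [beq_eq_false_iff_ne, ne_eq]
        exact fun e => h e.symm
      simp [hk, List.find?_cons, hq', ih, hkk']
    · rw [if_pos (by simp [hk])]
      rw [List.find?_cons, List.find?_cons]
      cases hqe : (q.1 == k') <;> simp [hqe, ih]

lemma pv_get?_erase_ne {ν : Type} (d : PySem.Dict String ν) (k k' : String) (h : k' ≠ k) :
    (d.erase k).get? k' = d.get? k' := by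
  simp only [PySem.Dict.erase, PySem.Dict.get?]
  rw [pv_find_filter_ne d.items k k' h]

lemma pv_not_key_of_get?_none {ν : Type} (d : PySem.Dict String ν) (k : String)
    (h : d.get? k = none) : ∀ q ∈ d.items, q.1 ≠ k := by
  intro q hq hk
  have hf : d.items.find? (fun p => p.1 == k) = none := by
    simpa [PySem.Dict.get?] using h
  have := List.find?_eq_none.mp hf q hq
  simp [hk] at this

lemma pv_loopB (prev : List (String × List (String × String))) :
    ∀ (xs : List (String × List (String × String)))
      (rem nb ub cb : PySem.Dict String (List (String × String))),
    (xs.map Prod.fst).Nodup →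
    (∀ p ∈ xs, rem.get? p.1 = (PySem.Dict.mk prev).get? p.1) →
    (∀ p ∈ xs, nb.contains p.1 = false) →
    (∀ p ∈ xs, ub.contains p.1 = false) →
    (∀ p ∈ xs, cb.contains p.1 = false) →
    (xs.foldl pvStepB (rem, nb, ub, cb)).1.items
        = rem.items.filter (fun q => !((xs.map Prod.fst).contains q.1)) ∧
    (xs.foldl pvStepB (rem, nb, ub, cb)).2.1.items
        = nb.items ++ xs.filter (fun p => !(PySem.Dict.mk prev).contains p.1) ∧
    (xs.foldl pvStepB (rem, nb, ub, cb)).2.2.1.items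
        = ub.items ++ xs.filter (fun p => (PySem.Dict.mk prev).contains p.1 && !pvDictEq ((PySem.Dict.mk prev).getD p.1 []) p.2) ∧
    (xs.foldl pvStepB (rem, nb, ub, cb)).2.2.2.items
        = cb.items ++ xs.filter (fun p => (PySem.Dict.mk prev).contains p.1 && pvDictEq ((PySem.Dict.mk prev).getD p.1 []) p.2) := by
  intro xs
  induction xs with
  | nil => intro rem nb ub cb _ _ _ _ _; simp
  | cons p t ih =>
    intro rem nb ub cb hnd hrem hn hu hc
    have hnd' : (t.map Prod.fst).Nodup := (List.nodup_cons.mp hnd).2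
    have hpt : p.1 ∉ t.map Prod.fst := (List.nodup_cons.mp hnd).1
    have hne : ∀ q ∈ t, q.1 ≠ p.1 := by
      intro q hq hqe
      exact hpt (hqe ▸ List.mem_map.mpr ⟨q, hq, rfl⟩)
    have hrp : rem.get? p.1 = (PySem.Dict.mk prev).get? p.1 := hrem p (by simp)
    have hcont : ((PySem.Dict.mk prev).contains p.1) = ((PySem.Dict.mk prev).get? p.1).isSome :=
      PySem.Dict.contains_eq_isSome_get? _ _
    simp only [List.foldl_cons]
    by_cases h1 : (PySem.Dict.mk prev).get? p.1 = none
    · -- p.1 absent from remaining: goes to the 'new' bucket, remaining untouched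
      have hc1 : (PySem.Dict.mk prev).contains p.1 = false := by rw [hcont, h1]; rfl
      have hstep : pvStepB (rem, nb, ub, cb) p = (rem, nb.insert p.1 p.2, ub, cb) := by
        rw [pvStepB]
        simp [PySem.Dict.pop?, hrp, h1]
      rw [hstep]
      obtain ⟨e1, e2, e3, e4⟩ := ih rem (nb.insert p.1 p.2) ub cb hnd'
        (fun q hq => hrem q (by simp [hq]))
        (fun q hq => by
          rw [PySem.Dict.contains_insert]
          simp [hne q hq, hn q (by simp [hq])])
        (fun q hq => hu q (by simp [hq])) (fun q hq => hc q (by simp [hq]))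
      refine ⟨?_, ?_, ?_, ?_⟩
      · rw [e1]
        refine List.filter_congr ?_
        intro q hq
        have hqp : q.1 ≠ p.1 := pv_not_key_of_get?_none rem p.1 (by rw [hrp]; exact h1) q hq
        simp [List.contains_cons, hqp]
      · rw [e2, PySem.Dict.items_insert_of_not_contains _ _ (hn p (by simp)),
          List.filter_cons]
        simp [hc1]
      · rw [e3, List.filter_cons]; simp [hc1]
      · rw [e4, List.filter_cons]; simp [hc1]
    · rw [← ne_eq, Option.ne_none_iff_exists'] at h1
      obtain ⟨w, hw⟩ := h1
      have hc1 : (PySem.Dict.mk prev).contains p.1 = true := by rw [hcont, hw]; rfl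
      have hgD : (PySem.Dict.mk prev).getD p.1 [] = w :=
        PySem.Dict.getD_of_get?_eq_some _ _ hw
      have hrem' : ∀ q ∈ t, (rem.erase p.1).get? q.1 = (PySem.Dict.mk prev).get? q.1 := by
        intro q hq
        rw [pv_get?_erase_ne rem p.1 q.1 (hne q hq), hrem q (by simp [hq])]
      have herase : (rem.erase p.1).items = rem.items.filter (fun q => !(q.1 == p.1)) := rfl
      have hfilt : ∀ (d : PySem.Dict String (List (String × String))),
          d.items = rem.items.filter (fun q => !(q.1 == p.1)) →
          d.items.filter (fun q => !((t.map Prod.fst).contains q.1))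
            = rem.items.filter (fun q => !(((p :: t).map Prod.fst).contains q.1)) := by
        intro d hd
        rw [hd, List.filter_filter]
        refine List.filter_congr ?_
        intro q hq
        simp [List.contains_cons, Bool.and_comm]
      by_cases h2 : pvDictEq w p.2 = false
      · -- present and different: 'updated'
        have hstep : pvStepB (rem, nb, ub, cb) p = (rem.erase p.1, nb, ub.insert p.1 p.2, cb) := by
          rw [pvStepB]
          simp [PySem.Dict.pop?, hrp, hw, h2]
        rw [hstep]
        obtain ⟨e1, e2, e3, e4⟩ := ih (rem.erase p.1) nb (ub.insert p.1 p.2) cb hnd' hrem'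
          (fun q hq => hn q (by simp [hq]))
          (fun q hq => by
            rw [PySem.Dict.contains_insert]
            simp [hne q hq, hu q (by simp [hq])])
          (fun q hq => hc q (by simp [hq]))
        refine ⟨?_, ?_, ?_, ?_⟩
        · rw [e1]; exact hfilt _ herase
        · rw [e2, List.filter_cons]; simp [hc1]
        · rw [e3, PySem.Dict.items_insert_of_not_contains _ _ (hu p (by simp)),
            List.filter_cons]
          simp [hc1, hgD, h2]
        · rw [e4, List.filter_cons]; simp [hc1, hgD, h2]
      · -- present and equal: 'unchanged'
        rw [Bool.not_eq_false] at h2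
        have hstep : pvStepB (rem, nb, ub, cb) p = (rem.erase p.1, nb, ub, cb.insert p.1 p.2) := by
          rw [pvStepB]
          simp [PySem.Dict.pop?, hrp, hw, h2]
        rw [hstep]
        obtain ⟨e1, e2, e3, e4⟩ := ih (rem.erase p.1) nb ub (cb.insert p.1 p.2) hnd' hrem'
          (fun q hq => hn q (by simp [hq]))
          (fun q hq => hu q (by simp [hq]))
          (fun q hq => by
            rw [PySem.Dict.contains_insert]
            simp [hne q hq, hc q (by simp [hq])])
        refine ⟨?_, ?_, ?_, ?_⟩
        · rw [e1]; exact hfilt _ herase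
        · rw [e2, List.filter_cons]; simp [hc1]
        · rw [e3, List.filter_cons]; simp [hc1, hgD, h2]
        · rw [e4, PySem.Dict.items_insert_of_not_contains _ _ (hc p (by simp)),
            List.filter_cons]
          simp [hc1, hgD, h2]

-- the residual filter over prev equals A's 'removed' filter
lemma pv_removed_eq (prev new : List (String × List (String × String))) :
    prev.filter (fun q => !((new.map Prod.fst).contains q.1))
      = prev.filter (fun p => !(PySem.Dict.mk new).contains p.1) := by
  refine List.filter_congr ?_
  intro q _
  congr 1
  simp only [PySem.Dict.contains_mk, List.contains_eq_mem, List.any_eq, List.mem_map,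
    decide_eq_true_eq]
  by_cases h : ∃ p ∈ new, p.1 = q.1
  · obtain ⟨p, hp, he⟩ := h
    have h1 : q.1 ∈ new.map Prod.fst := List.mem_map.mpr ⟨p, hp, he⟩
    have h2 : ∃ x ∈ new, (x.1 == q.1) = true := ⟨p, hp, by simp [he]⟩
    simp [h1, h2]
  · have h1 : q.1 ∉ new.map Prod.fst := by
      intro hm; obtain ⟨p, hp, he⟩ := List.mem_map.mp hm; exact h ⟨p, hp, he⟩
    have h2 : ¬ ∃ x ∈ new, (x.1 == q.1) = true := by
      rintro ⟨p, hp, he⟩; exact h ⟨p, hp, by simpa using he⟩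
    simp [h1, h2]

-- ===== VERDICT (by name: the statement is the Claim_ definition above) =====
theorem get_inventory_changes_spec : Claim_equal_get_inventory_changes := by
  intro prev new _ hpre
  unfold Spec_get_inventory_changes get_inventory_changes get_inventory_changes_alt
  obtain ⟨hndp, hndn⟩ := hpre
  have hgetn : ∀ p ∈ new, (PySem.Dict.mk new).get? p.1 = some p.2 := fun p hp =>
    PySem.Dict.get?_of_mem_items (PySem.Dict.mk new) (k := p.1) (v := p.2) hp
      (by rw [PySem.Dict.keys_mk]; exact hndn)
  have hgetp : ∀ p ∈ prev, (PySem.Dict.mk prev).get? p.1 = some p.2 := fun p hp =>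
    PySem.Dict.get?_of_mem_items (PySem.Dict.mk prev) (k := p.1) (v := p.2) hp
      (by rw [PySem.Dict.keys_mk]; exact hndp)
  rw [pv_loop1 prev new new [] [] [] [] hgetn hndn (by simp) (by simp) (by simp),
      pv_loop2 prev new prev _ [] _ _ hgetp hndp (by simp)]
  obtain ⟨e1, e2, e3, e4⟩ := pv_loopB prev new (PySem.Dict.mk prev)
    PySem.Dict.empty PySem.Dict.empty PySem.Dict.empty hndn
    (fun p _ => rfl) (fun p _ => rfl) (fun p _ => rfl) (fun p _ => rfl)
  rcases hfold : new.foldl pvStepB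
      (PySem.Dict.mk prev, PySem.Dict.empty, PySem.Dict.empty, PySem.Dict.empty)
    with ⟨remaining, new_hosts, updated, unchanged⟩
  rw [hfold] at e1 e2 e3 e4
  simp only
  rw [e1, e2, e3, e4, pv_removed_eq prev new]
  rfl
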